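/- GENERATED by c/gen_decode.py: decode facts of the image, one per distinct instruction byte string. -/
import UserX.DecodeImage

#decode_all Vorbis.Dec
  "018370050000"  -- add DWORD PTR [rbx+0x570],eax
  "0f57c1"  -- xorps xmm0,xmm1
  "0f84b2000000"  -- je 114cfb
  "0f85c5feffff"  -- jne 10f911
  "0f8e0cfeffff"  -- jle 10dc3e
  "0fb6430d"  -- movzx eax,BYTE PTR [rbx+0xd]
  "29c3"  -- sub ebx,eax
  "400fb6c5"  -- movzx eax,bpl
  "410fb7746f02"  -- movzx esi,WORD PTR [r15+rbp*2+0x2]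
  "4183c520"  -- add r13d,0x20
  "4189cf"  -- mov r15d,ecx
  "41b800000000"  -- mov r8d,0x0
  "41f7ff"  -- idiv r15d
  "4429e1"  -- sub ecx,r12d
  "4488abd4060000"  -- mov BYTE PTR [rbx+0x6d4],r13b
  "4489ade0010000"  -- mov DWORD PTR [rbp+0x1e0],r13d
  "448b6c244c"  -- mov r13d,DWORD PTR [rsp+0x4c]
  "448d7c0500"  -- lea r15d,[rbp+rax*1+0x0]
  "4589742404"  -- mov DWORD PTR [r12+0x4],r14d
  "460fb6642311"  -- movzx r12d,BYTE PTR [rbx+r12*1+0x11]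
  "4829d0"  -- sub rax,rdx
  "4869db3c060000"  -- imul rbx,rbx,0x63c
  "4883eb40"  -- sub rbx,0x40
  "48897c2418"  -- mov QWORD PTR [rsp+0x18],rdi
  "488b442468"  -- mov rax,QWORD PTR [rsp+0x68]
  "488b9d30080000"  -- mov rbx,QWORD PTR [rbp+0x830]
  "488d5c2450"  -- lea rbx,[rsp+0x50]
  "488d7d18"  -- lea rdi,[rbp+0x18]
  "488dbb70050000"  -- lea rdi,[rbx+0x570]
  "488dbd9c000000"  -- lea rdi,[rbp+0x9c]
  "48c744242060361100"  -- mov QWORD PTR [rsp+0x20],0x113660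
  "49039fa8000000"  -- add rbx,QWORD PTR [r15+0xa8]
  "49896e08"  -- mov QWORD PTR [r14+0x8],rbp
  "498d7c1f41"  -- lea rdi,[r15+rbx*1+0x41]
  "498dbc5f52010000"  -- lea rdi,[r15+rbx*2+0x152]
  "4a8d1cbd04000000"  -- lea rbx,[r15*4+0x4]
  "4c036d08"  -- add r13,QWORD PTR [rbp+0x8]
  "4c89742428"  -- mov QWORD PTR [rsp+0x28],r14
  "4c8b6da8"  -- mov r13,QWORD PTR [rbp-0x58]
  "4c8d6c30f4"  -- lea r13,[rax+rsi*1-0xc]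
  "4d89ce"  -- mov r14,r9
  "4e8d7c2311"  -- lea r15,[rbx+r12*1+0x11]
  "660fefed"  -- pxor xmm5,xmm5
  "66453927"  -- cmp WORD PTR [r15],r12w
  "7406"  -- je 10ef41
  "7485"  -- je 111834
  "75e3"  -- jne 1018e2
  "7d32"  -- jge 1022b6
  "7f34"  -- jg 10f6e4
  "81ffff3f0000"  -- cmp edi,0x3fff
  "83f807"  -- cmp eax,0x7
  "8954242c"  -- mov DWORD PTR [rsp+0x2c],edx
  "89c7"  -- mov edi,eax
  "8b4c2410"  -- mov ecx,DWORD PTR [rsp+0x10]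
  "8b8524ffffff"  -- mov eax,DWORD PTR [rbp-0xdc]
  "8d7eff"  -- lea edi,[rsi-0x1]
  "bfc0171200"  -- mov edi,0x1217c0
  "c744245000000000"  -- mov DWORD PTR [rsp+0x50],0x0
  "c78528ffffff00000000"  -- mov DWORD PTR [rbp-0xd8],0x0
  "e80778ffff"  -- call 100640
  "e81129ffff"  -- call 100640
  "e81aa1feff"  -- call 100640
  "e824affeff"  -- call 100560
  "e82d7effff"  -- call 10d1c0
  "e83783ffff"  -- call 104f00
  "e842feffff"  -- call 10cbc0
  "e84d71ffff"  -- call 100720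
  "e8578affff"  -- call 100a80
  "e865feffff"  -- call 10d440
  "e87046ffff"  -- call 108f20
  "e87af4feff"  -- call 100300
  "e887a6feff"  -- call 100720
  "e890acfeff"  -- call 100300
  "e89abdffff"  -- call 10d1c0
  "e8a5bdfeff"  -- call 100640
  "e8afd5ffff"  -- call 100800
  "e8b96bffff"  -- call 100640
  "e8c3b8ffff"  -- call 100480
  "e8ccb0feff"  -- call 1003c0
  "e8d788ffff"  -- call 100800
  "e8e19ffeff"  -- call 1003c0
  "e8eb6bffff"  -- call 10d1c0
  "e8f2edfeff"  -- call 100300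
  "e8fdfcffff"  -- call 107500
  "e93bf2ffff"  -- jmp 113b22
  "e985010000"  -- jmp 1111dd
  "e9ddfeffff"  -- jmp 10351d
  "eb4a"  -- jmp 1141f7
  "ebcb"  -- jmp 10d775
  "f20f2ac3"  -- cvtsi2sd xmm0,ebx
  "f20f5ae0"  -- cvtsd2ss xmm4,xmm0
  "f30f1045b0"  -- movss xmm0,DWORD PTR [rbp-0x50]
  "f30f106c2408"  -- movss xmm5,DWORD PTR [rsp+0x8]
  "f30f114bd8"  -- movss DWORD PTR [rbx-0x28],xmm1
  "f30f116c2408"  -- movss DWORD PTR [rsp+0x8],xmm5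
  "f30f584db0"  -- addss xmm1,DWORD PTR [rbp-0x50]
  "f30f59c2"  -- mulss xmm0,xmm2
  "f30f5cef"  -- subss xmm5,xmm7
  "f3410f115500"  -- movss DWORD PTR [r13+0x0],xmm2
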